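-- pv_equiv track=rewrite | github.com/Hugh-KR/Algorithm | Programmers/Lv2/광물_캐기.py | make_minerals_list
-- ===== SOURCE A (Python) =====
-- def make_minerals_list(minerals):
--     # 각각 다이아, 철, 돌
--     # 다섯 개로 나누어지지 않는 마지막 부분 대비해 배열 + 1
--     minerals_list = [[0,0,0] for _ in range(len(minerals)//5+1)]
--     for i in range(len(minerals)):
--         if minerals[i] == 'diamond':
--             # 하나의 배열에 다섯개씩 채워넣음
--             # 0,1,2,3,4 -> 0
--             # 5,6,7,8,9 -> 1
--             minerals_list[i//5][0] += 1
--         if minerals[i] == 'iron':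
--             minerals_list[i//5][1] += 1
--         if minerals[i] == 'stone':
--             minerals_list[i//5][2] += 1
--     # 광물의 순서를 다이아, 철, 돌 순서대로 정렬해줌
--     # lambda의 첫 번째 인자를 기준으로 먼저 내림차순 정렬, 그 다음 두 번째, 세 번째 순서로 내림차순
--     minerals_list.sort(key=lambda x:(-x[0],-x[1],-x[2]))
--     return minerals_list
-- ===== SOURCE B (Python) =====
-- def make_minerals_list(minerals):
--     # gather per chunk via slices instead of scattering each element into a
--     # preallocated bucket by i//5; same len//5+1 chunk count, same sort key
--     chunks = [minerals[i * 5:i * 5 + 5] for i in range(len(minerals) // 5 + 1)]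
--     counts = [[c.count('diamond'), c.count('iron'), c.count('stone')] for c in chunks]
--     counts.sort(key=lambda x: (-x[0], -x[1], -x[2]))
--     return counts
-- ===== Notes on version B (the rewrite author's own statement) =====
-- stated objective: simpler
-- what changed: B builds each 5-chunk explicitly by slicing and maps it to its three counts (gather per chunk), instead of A's preallocated bucket array that every element is scattered into at index i//5; the sort key is unchanged.
import Mathlib
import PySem

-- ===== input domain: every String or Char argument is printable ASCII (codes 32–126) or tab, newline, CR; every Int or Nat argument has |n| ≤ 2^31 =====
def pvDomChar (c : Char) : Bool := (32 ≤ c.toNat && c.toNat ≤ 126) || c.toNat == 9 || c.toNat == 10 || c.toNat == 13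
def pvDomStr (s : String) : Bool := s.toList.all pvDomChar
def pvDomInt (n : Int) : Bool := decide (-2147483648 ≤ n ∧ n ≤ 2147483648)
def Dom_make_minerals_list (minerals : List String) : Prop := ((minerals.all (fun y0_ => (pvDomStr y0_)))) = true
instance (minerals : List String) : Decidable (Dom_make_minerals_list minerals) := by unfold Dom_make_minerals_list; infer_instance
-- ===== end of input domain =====

-- B groups the minerals into the 5-chunks directly by slicing and maps each chunk to its
-- three counts, instead of A's preallocated bucket array scattered into at index i//5;
-- same chunk count len//5+1 and the same descending sort key, so the results are identical.

-- ===== PORT A =====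
-- The Python sort key is the tuple (-x[0], -x[1], -x[2]); it is ported as the Int list
-- [-x[0], -x[1], -x[2]] because Lean's `<` on List Int is exactly Python's lexicographic
-- tuple comparison (Mathlib's Prod `<` is the pointwise order, which would be wrong).
-- The identical lambda appears in both Python sources, so both ports share this helper.
def mmlKey (x : List Int) : List Int :=
  [-(PySem.List.pyGetD x 0 0), -(PySem.List.pyGetD x 1 0), -(PySem.List.pyGetD x 2 0)]

-- one iteration of A's loop body: `minerals_list[i//5][j] += 1` is read-modify-write
-- (pyGetD the row, pySetD the cell, pySetD the row back), one `if` per mineral kind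
def mmlUpd (acc : List (List Int)) (i : Int) (m : String) : List (List Int) :=
  let j := PySem.Int.floordiv i 5
  let acc := if m == "diamond" then
      let row := PySem.List.pyGetD acc j []
      PySem.List.pySetD acc j (PySem.List.pySetD row 0 (PySem.List.pyGetD row 0 0 + 1))
    else acc
  let acc := if m == "iron" then
      let row := PySem.List.pyGetD acc j []
      PySem.List.pySetD acc j (PySem.List.pySetD row 1 (PySem.List.pyGetD row 1 0 + 1))
    else acc
  let acc := if m == "stone" then
      let row := PySem.List.pyGetD acc j []
      PySem.List.pySetD acc j (PySem.List.pySetD row 2 (PySem.List.pyGetD row 2 0 + 1))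
    else acc
  acc

def mmlStepA (minerals : List String) (acc : List (List Int)) (i : Int) : List (List Int) :=
  mmlUpd acc i (PySem.List.pyGetD minerals i "")   -- m = minerals[i] (always in range here)

def make_minerals_list (minerals : List String) : List (List Int) :=
  PySem.List.sorted
    ((PySem.List.pyRange 0 (PySem.List.len minerals) 1).foldl (mmlStepA minerals)
      ((PySem.List.pyRange 0 (PySem.Int.floordiv (PySem.List.len minerals) 5 + 1) 1).map
        (fun _ => ([0, 0, 0] : List Int))))
    mmlKey

-- ===== PORT B =====
def make_minerals_list_alt (minerals : List String) : List (List Int) :=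
  PySem.List.sorted
    (((PySem.List.pyRange 0 (PySem.Int.floordiv (PySem.List.len minerals) 5 + 1) 1).map
        (fun i => PySem.List.slice minerals (some (i * 5)) (some (i * 5 + 5)))).map
      (fun c => ([(PySem.List.count c "diamond" : Int), (PySem.List.count c "iron" : Int),
        (PySem.List.count c "stone" : Int)] : List Int)))
    mmlKey

-- ===== PRECONDITION & SPEC =====
def Spec_make_minerals_list (minerals : List String) (out : List (List Int)) : Prop := out = make_minerals_list_alt minerals
instance (minerals : List String) (out : List (List Int)) : Decidable (Spec_make_minerals_list minerals out) := by unfold Spec_make_minerals_list; infer_instance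

-- ===== CLAIM (what is proved, stated in full; the proofs are below) =====
def Claim_equal_make_minerals_list : Prop := ∀ (minerals : List String), Dom_make_minerals_list minerals → Spec_make_minerals_list minerals (make_minerals_list minerals)

-- ===== LEMMAS AND PROOFS =====

-- the common spine: the list of per-chunk count triples, one chunk of five at a time
-- (a final short or empty chunk included, matching the len//5+1 of both programs)
def mmlCnt (c : List String) : List Int :=
  [(PySem.List.count c "diamond" : Int), (PySem.List.count c "iron" : Int),
   (PySem.List.count c "stone" : Int)]

def mmlG (ms : List String) : List (List Int) :=
  if _h : ms.length < 5 then [mmlCnt ms]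
  else mmlCnt (ms.take 5) :: mmlG (ms.drop 5)
termination_by ms.length
decreasing_by simp; omega

-- unfold one step of mmlG
lemma mmlG_lt (ms : List String) (h : ms.length < 5) : mmlG ms = [mmlCnt ms] := by
  rw [mmlG]; simp [h]

lemma mmlG_ge (ms : List String) (h : ¬ ms.length < 5) :
    mmlG ms = mmlCnt (ms.take 5) :: mmlG (ms.drop 5) := by
  rw [mmlG]; simp [h]

-- xs[a:a+5] is five elements from position a
lemma mml_slice5 (ms : List String) (a : Nat) :
    PySem.List.slice ms (some ((a : Int))) (some ((a : Int) + 5)) = (ms.drop a).take 5 := by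
  rw [PySem.List.slice_toNat ms (by omega) (by omega)]
  have h1 : ((a : Int)).toNat = a := by omega
  have h2 : (((a : Int) + 5)).toNat = a + 5 := by omega
  rw [h1, h2]
  congr 1
  omega

-- B's chunk comprehension, over List.range, is mmlG
lemma mml_range_slices : ∀ (n : Nat) (ms : List String), ms.length = n →
    (List.range (n / 5 + 1)).map
      (fun k : Nat => mmlCnt (PySem.List.slice ms (some ((k : Int) * 5)) (some ((k : Int) * 5 + 5))))
      = mmlG ms := by
  intro n
  induction n using Nat.strong_induction_on with
  | _ n IH =>
    intro ms hlen
    have hsl0 : PySem.List.slice ms (some (((0 : Nat) : Int) * 5))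
        (some (((0 : Nat) : Int) * 5 + 5)) = ms.take 5 := by
      have := mml_slice5 ms 0
      norm_num at this ⊢
      exact this
    by_cases h5 : n < 5
    · have hdiv : n / 5 = 0 := Nat.div_eq_of_lt h5
      rw [hdiv, show (0 : Nat) + 1 = 1 from rfl, List.range_one, List.map_cons, List.map_nil,
        hsl0, List.take_of_length_le (by omega), mmlG_lt ms (by omega)]
    · have hdiv : n / 5 + 1 = ((n - 5) / 5 + 1) + 1 := by omega
      rw [show n / 5 + 1 = ((n - 5) / 5 + 1) + 1 from hdiv, List.range_succ_eq_map,
        List.map_cons, List.map_map, hsl0, mmlG_ge ms (by omega)]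
      congr 1
      rw [← IH (n - 5) (by omega) (ms.drop 5) (by simp [hlen])]
      apply List.map_congr_left
      intro k _
      simp only [Function.comp_apply, Nat.succ_eq_add_one]
      have e1 : (((k + 1 : Nat)) : Int) * 5 = ((5 + 5 * k : Nat) : Int) := by push_cast; ring
      have e2 : (((k : Nat)) : Int) * 5 = ((5 * k : Nat) : Int) := by push_cast; ring
      rw [e1, mml_slice5 ms (5 + 5 * k), e2, mml_slice5 (ms.drop 5) (5 * k), List.drop_drop]

-- evaluate the Python-index primitives at the small literal indexes A uses
lemma mml_get1 {g : Type} (x y : g) (xs : List g) (w : g) :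
    PySem.List.pyGetD (x :: y :: xs) (1 : Int) w = y := by
  rw [show ((1 : Int)) = ((1 : Nat) : Int) by norm_num, PySem.List.pyGetD_natCast]
  rfl

lemma mml_get2 {g : Type} (x y z : g) (xs : List g) (w : g) :
    PySem.List.pyGetD (x :: y :: z :: xs) (2 : Int) w = z := by
  rw [show ((2 : Int)) = ((2 : Nat) : Int) by norm_num, PySem.List.pyGetD_natCast]
  rfl

lemma mml_set0 {g : Type} (x : g) (xs : List g) (v : g) :
    PySem.List.pySetD (x :: xs) (0 : Int) v = v :: xs := by
  rw [show ((0 : Int)) = ((0 : Nat) : Int) by norm_num, PySem.List.pySetD_natCast]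
  rfl

lemma mml_set1 {g : Type} (x y : g) (xs : List g) (v : g) :
    PySem.List.pySetD (x :: y :: xs) (1 : Int) v = x :: v :: xs := by
  rw [show ((1 : Int)) = ((1 : Nat) : Int) by norm_num, PySem.List.pySetD_natCast]
  rfl

lemma mml_set2 {g : Type} (x y z : g) (xs : List g) (v : g) :
    PySem.List.pySetD (x :: y :: z :: xs) (2 : Int) v = x :: y :: v :: xs := by
  rw [show ((2 : Int)) = ((2 : Nat) : Int) by norm_num, PySem.List.pySetD_natCast]
  rfl

-- A's per-element update on an index < 5 hits only the head bucket
lemma mml_upd_head (s : Nat) (hs : s < 5) (a b d : Int) (t : List (List Int)) (m : String) :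
    mmlUpd ([a, b, d] :: t) (s : Int) m
      = [a + (if m = "diamond" then 1 else 0), b + (if m = "iron" then 1 else 0),
         d + (if m = "stone" then 1 else 0)] :: t := by
  have h0 : PySem.Int.floordiv (s : Int) 5 = 0 := by
    rw [PySem.Int.floordiv_eq_ediv_of_pos (by omega)]; omega
  by_cases hd : m = "diamond"
  · subst hd
    simp only [mmlUpd]
    rw [h0]
    simp [mml_set0]
  · by_cases hi : m = "iron"
    · subst hi
      simp only [mmlUpd]
      rw [h0]
      simp [mml_get1, mml_set0, mml_set1]
    · by_cases hst : m = "stone"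
      · subst hst
        simp only [mmlUpd]
        rw [h0]
        simp [mml_get2, mml_set0, mml_set2]
      · simp only [mmlUpd]
        rw [h0]
        simp [hd, hi, hst]

-- A's per-element update on an index ≥ 5 leaves the head bucket alone
lemma mml_upd_shift (s : Nat) (h : List Int) (t : List (List Int)) (m : String) :
    mmlUpd (h :: t) ((s : Int) + 5) m = h :: mmlUpd t (s : Int) m := by
  have hq : PySem.Int.floordiv ((s : Int) + 5) 5 = ((s / 5 + 1 : Nat) : Int) := by
    rw [PySem.Int.floordiv_eq_ediv_of_pos (by omega)]; push_cast; omega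
  have hq2 : PySem.Int.floordiv (s : Int) 5 = ((s / 5 : Nat) : Int) := by
    rw [PySem.Int.floordiv_eq_ediv_of_pos (by omega)]; push_cast; omega
  have e1 : ∀ (x : List Int) (xs : List (List Int)) (v : List Int),
      PySem.List.pySetD (x :: xs) ((s / 5 + 1 : Nat) : Int) v
        = x :: PySem.List.pySetD xs ((s / 5 : Nat) : Int) v := by
    intro x xs v
    rw [PySem.List.pySetD_natCast, PySem.List.pySetD_natCast, List.set_cons_succ]
  have e2 : ∀ (x : List Int) (xs : List (List Int)),
      PySem.List.pyGetD (x :: xs) ((s / 5 + 1 : Nat) : Int) ([] : List Int)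
        = PySem.List.pyGetD xs ((s / 5 : Nat) : Int) ([] : List Int) := by
    intro x xs
    rw [PySem.List.pyGetD_natCast, PySem.List.pyGetD_natCast, List.getD_cons_succ]
  simp only [mmlUpd]
  rw [hq, hq2]
  split_ifs <;> first | rfl | simp only [e1, e2]

lemma mml_chunk0 (c : List String) : ∀ (s : Nat) (a b d : Int) (t : List (List Int)),
    s + c.length ≤ 5 →
    (PySem.List.enumerate c (s : Int)).foldl (fun acc p => mmlUpd acc p.1 p.2) ([a, b, d] :: t)
      = [a + (PySem.List.count c "diamond" : Int), b + (PySem.List.count c "iron" : Int),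
         d + (PySem.List.count c "stone" : Int)] :: t := by
  induction c with
  | nil => intro s a b d t _; simp [PySem.List.enumerate_nil, PySem.List.count]
  | cons m c' ih =>
    intro s a b d t hle
    simp only [List.length_cons] at hle
    rw [PySem.List.enumerate_cons, List.foldl_cons]
    have hcast : ((s : Int) + 1) = ((s + 1 : Nat) : Int) := by push_cast; ring
    rw [mml_upd_head s (by omega) a b d t m, hcast, ih (s + 1) _ _ _ t (by omega)]
    have hc : ∀ (v : String), PySem.List.count (m :: c') v
        = PySem.List.count c' v + (if m = v then 1 else 0) := by
      intro v
      simp [PySem.List.count, List.count_cons]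
    rw [hc "diamond", hc "iron", hc "stone"]
    push_cast
    simp only [List.cons.injEq]
    exact ⟨⟨by ring, by ring, by ring, trivial⟩, trivial⟩

-- indices ≥ 5 act on the tail shifted by one bucket
lemma mml_shift (l : List String) : ∀ (s : Nat) (h : List Int) (t : List (List Int)),
    (PySem.List.enumerate l ((s : Int) + 5)).foldl (fun acc p => mmlUpd acc p.1 p.2) (h :: t)
      = h :: (PySem.List.enumerate l (s : Int)).foldl (fun acc p => mmlUpd acc p.1 p.2) t := by
  induction l with
  | nil => intro s h t; simp [PySem.List.enumerate_nil]
  | cons m l' ih =>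
    intro s h t
    rw [PySem.List.enumerate_cons, PySem.List.enumerate_cons, List.foldl_cons, List.foldl_cons]
    rw [mml_upd_shift s h t m]
    have hcast : ((s : Int) + 5 + 1) = ((s + 1 : Nat) : Int) + 5 := by push_cast; ring
    have hcast2 : ((s : Int) + 1) = ((s + 1 : Nat) : Int) := by push_cast; ring
    rw [hcast, hcast2, ih (s + 1)]

-- A's pre-sort list is mmlG
lemma mml_scatter : ∀ (n : Nat) (ms : List String), ms.length = n →
    (PySem.List.enumerate ms 0).foldl (fun acc p => mmlUpd acc p.1 p.2)
      (List.replicate (n / 5 + 1) ([0, 0, 0] : List Int)) = mmlG ms := by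
  intro n
  induction n using Nat.strong_induction_on with
  | _ n IH =>
    intro ms hlen
    by_cases h5 : n < 5
    · have hdiv : n / 5 = 0 := Nat.div_eq_of_lt h5
      rw [hdiv, show (0 : Nat) + 1 = 1 from rfl, List.replicate_one]
      have h0 := mml_chunk0 ms 0 0 0 0 [] (by omega)
      norm_num at h0
      rw [h0, mmlG_lt ms (by omega)]
      simp [mmlCnt]
    · have htd := List.take_append_drop 5 ms
      have hlt : (ms.take 5).length = 5 := by simp; omega
      conv_lhs => rw [← htd]
      rw [PySem.List.enumerate_append, List.foldl_append]
      have hdiv : n / 5 + 1 = ((n - 5) / 5 + 1) + 1 := by omega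
      rw [hdiv, List.replicate_succ]
      have h0 := mml_chunk0 (ms.take 5) 0 0 0 0
        (List.replicate ((n - 5) / 5 + 1) ([0, 0, 0] : List Int)) (by omega)
      norm_num at h0
      rw [h0]
      have hsh := mml_shift (ms.drop 5) 0
        ([(PySem.List.count (ms.take 5) "diamond" : Int),
          (PySem.List.count (ms.take 5) "iron" : Int),
          (PySem.List.count (ms.take 5) "stone" : Int)])
        (List.replicate ((n - 5) / 5 + 1) ([0, 0, 0] : List Int))
      norm_num at hsh
      rw [hlt, show ((0 : Int) + (5 : Nat)) = (0 : Int) + 5 by norm_num, show ((0 : Int) + 5) = ((0 : Nat) : Int) + 5 by norm_num]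
      rw [mml_shift (ms.drop 5) 0]
      rw [show (((0 : Nat)) : Int) = (0 : Int) by norm_num]
      rw [IH (n - 5) (by omega) (ms.drop 5) (by simp [hlen])]
      rw [mmlG_ge ms (by omega)]
      simp [mmlCnt]

lemma mml_a_eq (ms : List String) :
    make_minerals_list ms = PySem.List.sorted (mmlG ms) mmlKey := by
  unfold make_minerals_list mmlStepA
  congr 1
  have hb : PySem.Int.floordiv (PySem.List.len ms) 5 + 1 = ((ms.length / 5 + 1 : Nat) : Int) := by
    rw [PySem.List.len_eq, PySem.Int.floordiv_eq_ediv_of_pos (by omega)]; push_cast; omega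
  have hinit : (PySem.List.pyRange 0 (PySem.Int.floordiv (PySem.List.len ms) 5 + 1) 1).map
      (fun _ => ([0, 0, 0] : List Int))
      = List.replicate (ms.length / 5 + 1) ([0, 0, 0] : List Int) := by
    rw [hb, PySem.List.pyRange_one, List.map_map]
    have h1 : ((((ms.length / 5 + 1 : Nat) : Int)) - 0).toNat = ms.length / 5 + 1 := by omega
    rw [h1]
    generalize ms.length / 5 + 1 = k
    induction k with
    | zero => simp
    | succ k ihk =>
      rw [List.range_succ, List.map_append, ihk]
      simp [List.replicate_succ']
  rw [hinit]
  have hs := mml_scatter ms.length ms rfl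
  rw [PySem.List.enumerate_eq_map_pyRange ms ""] at hs
  rw [List.foldl_map] at hs
  simp only at hs
  rw [← hs]

lemma mml_alt_eq (ms : List String) :
    make_minerals_list_alt ms = PySem.List.sorted (mmlG ms) mmlKey := by
  unfold make_minerals_list_alt
  congr 1
  rw [List.map_map]
  have hb : PySem.Int.floordiv (PySem.List.len ms) 5 + 1 = ((ms.length / 5 + 1 : Nat) : Int) := by
    rw [PySem.List.len_eq, PySem.Int.floordiv_eq_ediv_of_pos (by omega)]; push_cast; omega
  rw [hb, PySem.List.pyRange_one, List.map_map]
  have h1 : ((((ms.length / 5 + 1 : Nat) : Int)) - 0).toNat = ms.length / 5 + 1 := by omega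
  rw [h1]
  rw [← mml_range_slices ms.length ms rfl]
  apply List.map_congr_left
  intro k _
  simp [mmlCnt]

-- ===== VERDICT (by name: the statement is the Claim_ definition above) =====
theorem make_minerals_list_spec : Claim_equal_make_minerals_list := by
  intro ms _
  unfold Spec_make_minerals_list
  rw [mml_a_eq, mml_alt_eq]
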